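-- pv_equiv track=rewrite | github.com/benstaiger/daily-coding-problem | problem_534/solution.py | could_be_palindrome
-- ===== SOURCE A (Python) =====
-- from collections import defaultdict
--
-- def could_be_palindrome(word):
--     # Since palindromes are symmetric we know that for an even number of
--     # letters in the word, every character must occur an even number of
--     # times. If the word has an odd length, then at most one letter can
--     # occur an odd number of times and it would be the middle letter.
--     letter_count = defaultdict(int)
--     for w in word:
--         letter_count[w] += 1
--
--     num_odd = 0
--     for _, v in letter_count.items():
--         if v % 2 == 1:
--             num_odd += 1
--
--     if len(word) % 2 == 0:
--         return num_odd == 0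
--     else:
--         return num_odd == 1
-- ===== SOURCE B (Python) =====
-- def could_be_palindrome(word):
--     # One parity-tracking pass: keep the set of letters seen an odd number
--     # of times; a palindrome arrangement exists iff at most one remains.
--     odd = set()
--     for w in word:
--         if w in odd:
--             odd.remove(w)
--         else:
--             odd.add(w)
--     return len(odd) <= 1
-- ===== Notes on version B (the rewrite author's own statement) =====
-- stated objective: simpler
-- what changed: Replaces the frequency dict built in one loop, a second loop counting odd values, and the length-parity branch by a single toggling pass over a set of odd-count letters followed by one size check (odd-count parity equals length parity, so len(odd) <= 1 covers both branches).
import Mathlib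
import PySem

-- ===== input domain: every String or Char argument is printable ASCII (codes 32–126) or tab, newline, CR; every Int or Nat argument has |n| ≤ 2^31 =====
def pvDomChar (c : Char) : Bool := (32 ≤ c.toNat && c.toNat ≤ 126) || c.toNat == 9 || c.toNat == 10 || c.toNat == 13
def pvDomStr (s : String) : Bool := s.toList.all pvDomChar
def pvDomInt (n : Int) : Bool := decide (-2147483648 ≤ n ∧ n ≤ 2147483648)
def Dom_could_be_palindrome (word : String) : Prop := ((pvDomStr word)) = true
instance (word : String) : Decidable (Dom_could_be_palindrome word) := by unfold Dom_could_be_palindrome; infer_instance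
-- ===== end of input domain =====

-- B replaces A's frequency-dict + odd-count loop + length-parity branch by one
-- set-toggling pass and a single size check (simpler decomposition, same cost).


-- ===== PORT A =====
def could_be_palindrome (word : String) : Bool :=
  let letter_count : PySem.Dict Char Int :=
    word.toList.foldl (fun d w => d.modify w 0 (· + 1)) PySem.Dict.empty
  let num_odd : Int :=
    letter_count.items.foldl (fun n p => if PySem.Int.mod p.2 2 == 1 then n + 1 else n) 0
  if PySem.Int.mod (PySem.Str.len word) 2 == 0 then num_odd == 0 else num_odd == 1

-- ===== PORT B =====
-- loop body of Source B: toggle w's membership in the odd set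
-- (Source B's odd.remove(w) runs only under 'w in odd', where remove = discard, exact)
def pvToggle (s : PySem.Set Char) (w : Char) : PySem.Set Char :=
  if PySem.Set.contains s w then PySem.Set.discard s w else PySem.Set.add s w

def could_be_palindrome_alt (word : String) : Bool :=
  let odd : PySem.Set Char := word.toList.foldl pvToggle PySem.Set.empty
  decide (PySem.Set.len odd ≤ 1)

-- ===== PRECONDITION & SPEC =====
def Spec_could_be_palindrome (word : String) (out : Bool) : Prop := out = could_be_palindrome_alt word
instance (word : String) (out : Bool) : Decidable (Spec_could_be_palindrome word out) := by unfold Spec_could_be_palindrome; infer_instance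

-- ===== CLAIM (what is proved, stated in full; the proofs are below) =====
def Claim_equal_could_be_palindrome : Prop := ∀ (word : String), Dom_could_be_palindrome word → Spec_could_be_palindrome word (could_be_palindrome word)

-- ===== LEMMAS AND PROOFS =====

-- invariant of B's toggling loop: no duplicates, membership = parity of count, size parity
theorem pvToggle_inv (l : List Char) (s : List Char) (hs : s.Nodup) :
    (l.foldl pvToggle s).Nodup ∧
    (∀ c, c ∈ l.foldl pvToggle s ↔ (if c ∈ s then Even (l.count c) else Odd (l.count c))) ∧
    (l.foldl pvToggle s).length % 2 = (s.length + l.length) % 2 := by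
  induction l generalizing s with
  | nil =>
    refine ⟨hs, ?_, by simp⟩
    intro c; simp
  | cons x l ih =>
    have hadd : ¬ x ∈ s → PySem.Set.add s x = s ++ [x] := by
      intro hxs
      unfold PySem.Set.add
      rw [if_neg (fun h => hxs ((PySem.Set.contains_iff s x).mp h))]
    have hnodup : (pvToggle s x).Nodup := by
      unfold pvToggle
      by_cases hxs : x ∈ s
      · rw [if_pos ((PySem.Set.contains_iff s x).mpr hxs)]
        exact PySem.Set.nodup_discard s x hs
      · rw [if_neg (fun h => hxs ((PySem.Set.contains_iff s x).mp h)), hadd hxs]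
        refine hs.append (by simp) ?_
        intro a ha hb
        simp only [List.mem_singleton] at hb
        exact hxs (hb ▸ ha)
    obtain ⟨h1, h2, h3⟩ := ih (pvToggle s x) hnodup
    have hmem : ∀ c, c ∈ pvToggle s x ↔ (if c = x then ¬ (c ∈ s) else c ∈ s) := by
      intro c
      unfold pvToggle
      by_cases hxs : x ∈ s
      · rw [if_pos ((PySem.Set.contains_iff s x).mpr hxs)]
        rw [PySem.Set.mem_discard]
        by_cases hcx : c = x
        · subst hcx; simp [hxs]
        · simp [hcx]
      · rw [if_neg (fun h => hxs ((PySem.Set.contains_iff s x).mp h)), hadd hxs]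
        by_cases hcx : c = x
        · subst hcx; simp [hxs]
        · simp [hcx]
    have hlen : (pvToggle s x).length % 2 = (s.length + 1) % 2 := by
      unfold pvToggle
      by_cases hxs : x ∈ s
      · rw [if_pos ((PySem.Set.contains_iff s x).mpr hxs)]
        have hc1 : s.count x = 1 := List.count_eq_one_of_mem hs hxs
        have hsplit := List.length_eq_countP_add_countP (p := fun y => !(y == x)) (l := s)
        have hcnt : List.countP (fun a => decide ¬(!a == x) = true) s
            = s.count x := by
          apply List.countP_congr; intro a _; simp
        have hflt : (PySem.Set.discard s x).length = List.countP (fun y => !(y == x)) s := by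
          unfold PySem.Set.discard
          exact (List.countP_eq_length_filter).symm
        omega
      · rw [if_neg (fun h => hxs ((PySem.Set.contains_iff s x).mp h)), hadd hxs]
        simp
    refine ⟨h1, ?_, ?_⟩
    · intro c
      rw [List.foldl_cons, h2 c]
      by_cases hcx : c = x
      · subst hcx
        by_cases hcs : c ∈ s
        · have hnm : ¬ (c ∈ pvToggle s c) := by rw [hmem c]; simp [hcs]
          rw [if_neg hnm, if_pos hcs, List.count_cons_self]
          simp [Nat.even_iff, Nat.odd_iff]; omega
        · have hm : c ∈ pvToggle s c := by rw [hmem c]; simp [hcs]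
          rw [if_pos hm, if_neg hcs, List.count_cons_self]
          simp [Nat.even_iff, Nat.odd_iff]; omega
      · have hiff : (c ∈ pvToggle s x) ↔ (c ∈ s) := by rw [hmem c]; simp [hcx]
        rw [List.count_cons_of_ne (Ne.symm hcx)]
        by_cases hcs : c ∈ s
        · rw [if_pos (hiff.mpr hcs), if_pos hcs]
        · rw [if_neg (fun h => hcs (hiff.mp h)), if_neg hcs]
    · simp only [List.foldl_cons, List.length_cons]
      omega

-- the Python test 'count % 2 == 1' on a cast Nat is the Nat parity test
theorem pvMod2_cast (n : Nat) : (PySem.Int.mod (n : Int) 2 == (1 : Int)) = decide (n % 2 = 1) := by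
  rw [PySem.Int.mod_eq_emod_of_pos (by omega)]
  by_cases h : n % 2 = 1
  · have h2 : (n : Int) % 2 = 1 := by omega
    simp [h2, h]
  · have h2 : (n : Int) % 2 ≠ 1 := by omega
    simp [h2, h]

-- A's num_odd equals the size of the odd-count filter of the distinct letters
theorem pvNumOdd_eq (l : List Char) :
    (((PySem.Dict.counter l).items).foldl
        (fun n p => if PySem.Int.mod p.2 2 == 1 then n + 1 else n) (0 : Int))
      = (((PySem.Set.ofList l).filter (fun c => decide (l.count c % 2 = 1))).length : Int) := by
  rw [PySem.Dict.items_counter, List.foldl_map]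
  rw [PySem.List.foldl_count_if (p := fun k : Char => PySem.Int.mod ((l.count k : Nat) : Int) 2 == 1)]
  rw [show (fun k : Char => PySem.Int.mod ((l.count k : Nat) : Int) 2 == (1 : Int))
        = (fun c : Char => decide (l.count c % 2 = 1)) from funext fun c => pvMod2_cast (l.count c)]
  rw [List.countP_eq_length_filter]
  omega

-- B's odd set is a permutation of that same filter
theorem pvOddSet_perm (l : List Char) :
    (l.foldl pvToggle PySem.Set.empty).Perm
      ((PySem.Set.ofList l).filter (fun c => decide (l.count c % 2 = 1))) := by
  obtain ⟨h1, h2, -⟩ := pvToggle_inv l PySem.Set.empty List.nodup_nil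
  rw [List.perm_ext_iff_of_nodup h1 (List.Nodup.filter _ (PySem.Set.nodup_ofList l))]
  intro c
  rw [h2 c, List.mem_filter, PySem.Set.mem_ofList]
  rw [if_neg (by simp [PySem.Set.empty])]
  constructor
  · intro hodd
    have hpos : 0 < l.count c := by
      rcases hodd with ⟨k, hk⟩; omega
    exact ⟨List.count_pos_iff.mp hpos, by simpa [Nat.odd_iff] using hodd⟩
  · rintro ⟨-, h⟩
    simpa [Nat.odd_iff] using of_decide_eq_true h

-- ===== VERDICT (by name: the statement is the Claim_ definition above) =====
theorem could_be_palindrome_spec : Claim_equal_could_be_palindrome := by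
  intro word _
  show could_be_palindrome word = could_be_palindrome_alt word
  simp only [could_be_palindrome, could_be_palindrome_alt]
  rw [← PySem.Dict.counter_eq_foldl word.toList]
  rw [pvNumOdd_eq word.toList]
  have hklen := (pvOddSet_perm word.toList).length_eq
  obtain ⟨-, -, h3⟩ := pvToggle_inv word.toList PySem.Set.empty List.nodup_nil
  set n := word.toList.length with hn
  set k := ((PySem.Set.ofList word.toList).filter
      (fun c => decide (word.toList.count c % 2 = 1))).length with hkdef
  have hlen : PySem.Set.len (word.toList.foldl pvToggle PySem.Set.empty) = (k : Int) := by
    show ((word.toList.foldl pvToggle PySem.Set.empty).length : Int) = (k : Int)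
    rw [hklen]
  rw [hlen]
  have hpar : k % 2 = n % 2 := by
    rw [← hklen]
    simpa [PySem.Set.empty] using h3
  have hstr : PySem.Str.len word = (n : Int) := by
    simp [PySem.Str.len_eq, hn]
  rw [hstr, PySem.Int.mod_eq_emod_of_pos (by omega)]
  by_cases hp : n % 2 = 0
  · have hc : ((n : Int) % 2 == 0) = true := by simp; omega
    rw [hc, if_pos rfl]
    by_cases h0 : k = 0
    · simp [h0]
    · have hb1 : ((k : Int) == 0) = false := by simp; omega
      have hb2 : decide ((k : Int) ≤ 1) = false := by simp; omega
      rw [hb1, hb2]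
  · have hc : ((n : Int) % 2 == 0) = false := by simp; omega
    rw [hc, if_neg (by simp)]
    by_cases h1 : k = 1
    · simp [h1]
    · have hb1 : ((k : Int) == 1) = false := by simp; omega
      have hb2 : decide ((k : Int) ≤ 1) = false := by simp; omega
      rw [hb1, hb2]
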